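-- pv_equiv track=rewrite | github.com/mmlac/fieldnotes | worker/tests/test_migrate.py | _split_starts_with
-- ===== SOURCE A (Python) =====
-- def _split_starts_with(query: str) -> tuple[list[str], list[str]]:
--     """Return ``(positive_prefixes, guard_prefixes)`` extracted from
--     STARTS WITH literals in *query*.  A literal preceded by ``NOT``
--     is treated as a guard.
--     """
--     positives: list[str] = []
--     guards: list[str] = []
--     idx = 0
--     marker = "STARTS WITH '"
--     while True:
--         start = query.find(marker, idx)
--         if start == -1:
--             break
--         literal_start = start + len(marker)
--         end = query.find("'", literal_start)
--         if end == -1: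
--             break
--         literal = query[literal_start:end]
--         preceding = query[max(0, start - 8):start]
--         if "NOT " in preceding:
--             guards.append(literal)
--         else:
--             positives.append(literal)
--         idx = end + 1
--     return positives, guards
-- ===== SOURCE B (Python) =====
-- def _split_starts_with(query: str) -> tuple[list[str], list[str]]:
--     positives: list[str] = []
--     guards: list[str] = []
--     marker = "STARTS WITH '"
--     ctx = ""          # the part of the query already consumed
--     rest = query      # the part still to scan
--     while True:
--         head, sep, after = rest.partition(marker)
--         if not sep:
--             break
--         literal, quote, tail = after.partition("'")
--         if not quote:
--             break
--         ctx += head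
--         if "NOT " in ctx[-8:]:
--             guards.append(literal)
--         else:
--             positives.append(literal)
--         ctx += marker + literal + quote
--         rest = tail
--     return positives, guards
-- ===== Notes on version B (the rewrite author's own statement) =====
-- stated objective: alternative
-- what changed: B replaces A's index arithmetic (find with start offsets, max(0,start-8) window slices into the whole query) by index-free string decomposition: str.partition splits off head/marker/literal pieces, a consumed-context string grows on the left, and the NOT-guard window is just the last 8 characters of that context.
import Mathlib
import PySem

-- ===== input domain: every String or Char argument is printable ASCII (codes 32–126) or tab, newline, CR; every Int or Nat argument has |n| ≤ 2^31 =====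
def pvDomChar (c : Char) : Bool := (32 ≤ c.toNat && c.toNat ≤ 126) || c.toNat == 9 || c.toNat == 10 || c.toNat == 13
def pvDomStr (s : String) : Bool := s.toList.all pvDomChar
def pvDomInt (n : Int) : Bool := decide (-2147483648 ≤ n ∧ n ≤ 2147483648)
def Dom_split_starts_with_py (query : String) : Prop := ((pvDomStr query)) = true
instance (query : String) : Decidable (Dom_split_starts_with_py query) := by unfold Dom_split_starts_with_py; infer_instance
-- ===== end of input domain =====

-- B re-parses the query with str.partition and a rolling consumed-context string instead of A's
-- find/offset index arithmetic (objective: alternative, same O(n) cost; return values proved equal).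

-- ===== PORT A =====
-- A's while-loop, ported with fuel (query length + 1 never runs out: each iteration moves idx past
-- a marker occurrence, i.e. by at least 14 positions, so the loop runs at most |query|/14 + 1 times).
def pvLoopA (query : List Char) (fuel : Nat) (idx : Int)
    (positives guards : List (List Char)) : List (List Char) × List (List Char) :=
  match fuel with
  | 0 => (positives, guards)
  | fuel + 1 =>
    let start := PySem.Chars.findFrom query "STARTS WITH '".toList idx
    if start = -1 then (positives, guards)
    else
      let literalStart := start + ("STARTS WITH '".toList.length : Int)
      let endIdx := PySem.Chars.findFrom query ['\''] literalStart
      if endIdx = -1 then (positives, guards)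
      else
        let literal := PySem.Chars.slice query (some literalStart) (some endIdx)
        let preceding := PySem.Chars.slice query (some (max 0 (start - 8))) (some start)
        if PySem.Chars.isIn "NOT ".toList preceding then
          pvLoopA query fuel (endIdx + 1) positives (guards ++ [literal])
        else
          pvLoopA query fuel (endIdx + 1) (positives ++ [literal]) guards
def split_starts_with_py (query : String) : List String × List String :=
  let r := pvLoopA query.toList (query.toList.length + 1) 0 [] []
  (r.1.map String.ofList, r.2.map String.ofList)

-- ===== PORT B =====
-- hand port of Python str.partition (PySem has no partition): (before, sep-found?, after);
-- exact — Python returns (s, '', '') when sep is absent, the Bool models the emptiness test on sep.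
def pvPartition (s sep : List Char) : List Char × Bool × List Char :=
  let i := PySem.Chars.find s sep
  if i = -1 then (s, false, [])
  else (PySem.Chars.slice s none (some i), true,
        PySem.Chars.slice s (some (i + (sep.length : Int))) none)
-- B's while-loop (same fuel device as A's port; same bound applies to B's iterations).
def pvLoopB (fuel : Nat) (ctx rest : List Char)
    (positives guards : List (List Char)) : List (List Char) × List (List Char) :=
  match fuel with
  | 0 => (positives, guards)
  | fuel + 1 =>
    let p := pvPartition rest "STARTS WITH '".toList
    if p.2.1 = false then (positives, guards)
    else
      let p2 := pvPartition p.2.2 ['\'']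
      if p2.2.1 = false then (positives, guards)
      else
        let ctx1 := ctx ++ p.1
        let preceding := PySem.Chars.slice ctx1 (some (-8)) none
        let ctx2 := ctx1 ++ "STARTS WITH '".toList ++ p2.1 ++ ['\'']
        if PySem.Chars.isIn "NOT ".toList preceding then
          pvLoopB fuel ctx2 p2.2.2 positives (guards ++ [p2.1])
        else
          pvLoopB fuel ctx2 p2.2.2 (positives ++ [p2.1]) guards

def split_starts_with_py_alt (query : String) : List String × List String :=
  let r := pvLoopB (query.toList.length + 1) [] query.toList [] []
  (r.1.map String.ofList, r.2.map String.ofList)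

-- ===== PRECONDITION & SPEC =====
def Spec_split_starts_with_py (query : String) (out : List String × List String) : Prop := out = split_starts_with_py_alt query
instance (query : String) (out : List String × List String) : Decidable (Spec_split_starts_with_py query out) := by unfold Spec_split_starts_with_py; infer_instance

-- ===== CLAIM (what is proved, stated in full; the proofs are below) =====
def Claim_equal_split_starts_with_py : Prop := ∀ (query : String), Dom_split_starts_with_py query → Spec_split_starts_with_py query (split_starts_with_py query)

-- ===== LEMMAS AND PROOFS =====

-- s[-8:] is the last 8 characters
theorem pvSliceLast8 {α : Type} (xs : List α) :
    PySem.List.slice xs (some (-8)) none = xs.drop (xs.length - 8) := by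
  simp only [PySem.List.slice, PySem.List.clampIdx]
  split_ifs with h1 h2 <;> [skip; skip; omega]
  · have h0 : xs.length - 8 = 0 := by omega
    simp [h0]
  · have h0 : ((xs.length : Int) + (-8)).toNat = xs.length - 8 := by omega
    rw [h0]
    simp [List.take_drop]


-- the loop invariant: A scanning `ctx ++ rest` from index |ctx| is B scanning `rest` with context `ctx`
theorem pvLoopAB (fuel : Nat) : ∀ (ctx rest : List Char) (pos grd : List (List Char)),
    pvLoopA (ctx ++ rest) fuel (ctx.length : Int) pos grd = pvLoopB fuel ctx rest pos grd := by
  induction fuel with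
  | zero => intro ctx rest pos grd; rfl
  | succ fuel ih =>
    intro ctx rest pos grd
    have hlen : ctx.length ≤ (ctx ++ rest).length := by simp
    have h1 := PySem.Chars.findFrom_natCast (ctx ++ rest) ("STARTS WITH '".toList) ctx.length hlen
    rw [List.drop_left] at h1
    by_cases hf : PySem.Chars.find rest "STARTS WITH '".toList = -1
    · simp only [pvLoopA, pvLoopB, pvPartition, h1, hf, if_pos]
    · -- a marker occurrence exists
      have hge : 0 ≤ PySem.Chars.find rest "STARTS WITH '".toList := by
        have := PySem.Chars.neg_one_le_find rest "STARTS WITH '".toList; omega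
      obtain ⟨iN, hiN⟩ : ∃ n : Nat, PySem.Chars.find rest "STARTS WITH '".toList = (n : Int) :=
        ⟨_, (Int.toNat_of_nonneg hge).symm⟩
      have hspec := (PySem.Chars.find_spec (s := rest) (sub := "STARTS WITH '".toList) hge).1
      rw [hiN, Int.toNat_natCast] at hspec
      obtain ⟨aft, haft⟩ := hspec
      have hM : ("STARTS WITH '".toList).length = 13 := by decide
      have hiNle : iN ≤ rest.length := by
        have := PySem.Chars.find_le_length rest "STARTS WITH '".toList; rw [hiN] at this
        exact_mod_cast this
      have hlenaft : rest.length = iN + 13 + aft.length := by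
        have h := congrArg List.length haft
        simp [List.length_drop] at h
        omega
      have haft2 : rest.drop (iN + 13) = aft := by
        have h : rest.drop (iN + 13) = ((rest.drop iN).drop ("STARTS WITH '".toList).length) := by
          rw [List.drop_drop, hM]
        rw [h, ← haft, List.drop_left]
      have h13 : (("STARTS WITH '".toList.length : Nat) : Int) = 13 := by decide
      have hiN' : ((iN : Int)) ≠ -1 := by omega
      have hstart' : ((ctx.length : Int) + iN) ≠ -1 := by omega
      have hk2 : ctx.length + iN + 13 ≤ (ctx ++ rest).length := by
        simp [List.length_append]; omega
      have h2 := PySem.Chars.findFrom_natCast (ctx ++ rest) ['\''] (ctx.length + iN + 13) hk2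
      have hdropq : (ctx ++ rest).drop (ctx.length + iN + 13) = aft := by
        rw [show ctx.length + iN + 13 = ctx.length + (iN + 13) from by omega,
            ← List.drop_drop, List.drop_left, haft2]
      rw [hdropq] at h2
      have hcast : ((ctx.length : Int) + iN) + 13 = ((ctx.length + iN + 13 : Nat) : Int) := by
        push_cast; ring
      have e1 : PySem.List.slice rest none (some (iN : Int)) = rest.take iN := by
        rw [PySem.List.slice_to rest (Int.natCast_nonneg iN)]; simp
      have e2 : PySem.List.slice rest (some ((iN : Int) + 13)) none = aft := by
        rw [PySem.List.slice_from rest (by positivity)]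
        rw [show (((iN : Int) + 13)).toNat = iN + 13 from by omega]
        exact haft2
      by_cases hq : PySem.Chars.find aft ['\''] = -1
      · simp only [pvLoopA, pvLoopB, pvPartition, h1, hiN, hiN', h13, hstart', hcast, h2, hq,
          e1, e2, PySem.Chars.slice_eq_listSlice, List.length_singleton, Nat.cast_one,
          ite_false, if_pos]
        simp
      · -- a closing quote exists too
        have hge2 : 0 ≤ PySem.Chars.find aft ['\''] := by
          have := PySem.Chars.neg_one_le_find aft ['\'']; omega
        obtain ⟨jN, hjN⟩ : ∃ n : Nat, PySem.Chars.find aft ['\''] = (n : Int) :=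
          ⟨_, (Int.toNat_of_nonneg hge2).symm⟩
        have hspec2 := (PySem.Chars.find_spec (s := aft) (sub := ['\'']) hge2).1
        rw [hjN, Int.toNat_natCast] at hspec2
        obtain ⟨t2, ht2⟩ := hspec2
        have hjN' : ((jN : Int)) ≠ -1 := by omega
        have hlent2 : aft.length = jN + 1 + t2.length := by
          have h := congrArg List.length ht2
          simp [List.length_drop] at h
          omega
        have ht2' : aft.drop (jN + 1) = t2 := by
          have h : aft.drop (jN + 1) = (aft.drop jN).drop 1 := by rw [List.drop_drop]
          rw [h, ← ht2]
          simp
        have e3 : PySem.List.slice aft none (some (jN : Int)) = aft.take jN := by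
          rw [PySem.List.slice_to aft (Int.natCast_nonneg jN)]; simp
        have e4 : PySem.List.slice aft (some ((jN : Int) + 1)) none = t2 := by
          rw [PySem.List.slice_from aft (by positivity)]
          rw [show (((jN : Int) + 1)).toNat = jN + 1 from by omega]
          exact ht2'
        have hend' : ((ctx.length + iN + 13 : Nat) : Int) + (jN : Int) ≠ -1 := by
          have := Int.natCast_nonneg (ctx.length + iN + 13); omega
        have hcast2 : ((ctx.length + iN + 13 : Nat) : Int) + (jN : Int) = ((ctx.length + iN + 13 + jN : Nat) : Int) := by
          push_cast; ring
        have hlit : PySem.List.slice (ctx ++ rest) (some ((ctx.length + iN + 13 : Nat) : Int)) (some ((ctx.length + iN + 13 + jN : Nat) : Int)) = aft.take jN := by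
          rw [PySem.List.slice_natCast, hdropq]
          congr 1
          omega
        have htake : (ctx ++ rest).take (ctx.length + iN) = ctx ++ rest.take iN := by
          rw [List.take_append, List.take_of_length_le (by omega)]
          congr 2
          omega
        have hprec : PySem.List.slice (ctx ++ rest) (some (max 0 (↑ctx.length + (iN : Int) - 8))) (some (↑ctx.length + (iN : Int))) = PySem.List.slice (ctx ++ rest.take iN) (some (-8)) none := by
          rw [pvSliceLast8,
              show (max 0 ((↑ctx.length + (iN : Int)) - 8)) = ((ctx.length + iN - 8 : Nat) : Int) from by omega,
              show ((↑ctx.length + (iN : Int))) = ((ctx.length + iN : Nat) : Int) from by push_cast; ring,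
              PySem.List.slice_natCast,
              show (ctx ++ rest.take iN).length = ctx.length + iN from by simp [List.length_take]; omega,
              ← htake, List.drop_take]
        have happ : ((((ctx ++ rest.take iN) ++ "STARTS WITH '".toList) ++ aft.take jN) ++ ['\'']) ++ t2 = ctx ++ rest := by
          simp only [List.append_assoc]
          congr 1
          rw [show (['\''] ++ t2 : List Char) = ['\''] ++ t2 from rfl]
          rw [show ['\''] ++ t2 = aft.drop jN from ht2, List.take_append_drop, haft, List.take_append_drop]
        have hlen2 : ((((ctx ++ rest.take iN) ++ "STARTS WITH '".toList) ++ aft.take jN) ++ ['\'']).length = ctx.length + iN + 13 + jN + 1 := by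
          simp [List.length_append, List.length_take]
          omega
        have hcast3 : ((ctx.length + iN + 13 + jN : Nat) : Int) + 1 = ((ctx.length + iN + 13 + jN + 1 : Nat) : Int) := by
          push_cast; ring
        have hIH : ∀ pos grd, pvLoopA (ctx ++ rest) fuel (((ctx.length + iN + 13 + jN : Nat) : Int) + 1) pos grd = pvLoopB fuel ((((ctx ++ rest.take iN) ++ "STARTS WITH '".toList) ++ aft.take jN) ++ ['\'']) t2 pos grd := by
          intro pos grd
          have h := ih ((((ctx ++ rest.take iN) ++ "STARTS WITH '".toList) ++ aft.take jN) ++ ['\'']) t2 pos grd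
          rw [happ, hlen2, ← hcast3] at h
          exact h
        simp only [pvLoopA, pvLoopB, pvPartition, h1, hiN, hiN', h13, hstart', hcast, h2,
          hjN, hjN', hcast2, e1, e2, e3, e4, hlit, hprec, PySem.Chars.slice_eq_listSlice,
          List.length_cons, List.length_nil, zero_add, Nat.cast_one, ite_false]
        split_ifs <;>
          first
            | rfl
            | exact hIH pos (grd ++ [aft.take jN])
            | exact hIH (pos ++ [aft.take jN]) grd

-- ===== VERDICT (by name: the statement is the Claim_ definition above) =====
theorem split_starts_with_py_spec : Claim_equal_split_starts_with_py := by
  intro query _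
  unfold Spec_split_starts_with_py split_starts_with_py split_starts_with_py_alt
  have h := pvLoopAB (query.toList.length + 1) [] query.toList [] []
  simp only [List.nil_append, List.length_nil, Nat.cast_zero] at h
  rw [h]
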